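-- pv_equiv track=rewrite | github.com/cabbbyy/cmpm146-final | engine/othello.py | _board_with_discs
-- ===== SOURCE A (Python) =====
-- from typing import Dict, Optional, Tuple
--
-- Position = Tuple[int, int]
--
-- Board = Tuple[Tuple[str, ...], ...]
--
-- def _board_with_discs(
--     board: Board, updates: Tuple[Tuple[Position, str], ...]
-- ) -> Board:
--     rows = [list(row) for row in board]
--     for position, disc in updates:
--         row, col = position
--         rows[row][col] = disc
--     return tuple(tuple(row) for row in rows)
-- ===== SOURCE B (Python) =====
-- def _board_with_discs(board, updates):
--     # Record the updates in a sparse overlay (one cell-overlay list per touched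
--     # row), then merge: untouched rows are reused by reference, touched rows are
--     # rebuilt once from their overlay.
--     pending = [None] * len(board)
--     for (row, col), disc in updates:
--         if pending[row] is None:
--             pending[row] = [None] * len(board[row])
--         pending[row][col] = disc
--     return tuple(
--         row if over is None
--         else tuple(cell if d is None else d for d, cell in zip(over, row))
--         for over, row in zip(pending, board)
--     )
-- ===== Notes on version B (the rewrite author's own statement) =====
-- stated objective: alternative
-- what changed: A copies every row to a mutable list, applies the updates by in-place assignment and retuples the whole board; B records the updates in a sparse per-row overlay (one None-sentinel list per touched row) and merges once at the end, reusing untouched row tuples by reference. Pre_ excludes only inputs on which A raises IndexError (an update index out of range).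
import Mathlib
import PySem

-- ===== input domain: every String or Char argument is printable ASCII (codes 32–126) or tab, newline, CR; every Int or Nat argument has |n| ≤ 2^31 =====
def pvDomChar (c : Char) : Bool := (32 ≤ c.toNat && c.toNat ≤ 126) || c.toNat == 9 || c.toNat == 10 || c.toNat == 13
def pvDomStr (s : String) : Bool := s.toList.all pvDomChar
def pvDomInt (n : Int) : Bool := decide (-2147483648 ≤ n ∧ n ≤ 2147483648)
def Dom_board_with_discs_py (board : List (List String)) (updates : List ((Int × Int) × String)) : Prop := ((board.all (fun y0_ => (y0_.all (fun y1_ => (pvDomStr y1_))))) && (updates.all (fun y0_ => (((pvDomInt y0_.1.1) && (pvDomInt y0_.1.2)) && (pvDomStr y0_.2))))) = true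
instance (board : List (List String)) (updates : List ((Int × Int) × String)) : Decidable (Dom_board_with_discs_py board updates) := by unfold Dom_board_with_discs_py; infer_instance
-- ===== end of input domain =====

-- B records the updates in a sparse per-row overlay and merges once at the end
-- (untouched rows reused), instead of A's copy-all / mutate / retuple-all.

-- ===== PORT A =====
-- rows[row][col] = disc : read rows[row], set index col, write the row back
-- (Python index semantics; out-of-range = IndexError, excluded by Pre_,
--  where the port leaves the state unchanged)
def pvSetCell (rows : List (List String)) (r c : Int) (v : String) : List (List String) :=
  match PySem.List.pyGet? rows r with
  | none => rows
  | some row =>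
    match PySem.List.pySet? row c v with
    | none => rows
    | some row' => PySem.List.pySetD rows r row'

-- list(row) / tuple(row) copies are identities on immutable Lean lists
def board_with_discs_py (board : List (List String)) (updates : List ((Int × Int) × String)) : List (List String) :=
  updates.foldl (fun rows u => pvSetCell rows u.1.1 u.1.2 u.2) board

-- ===== PORT B =====
-- if pending[row] is None: pending[row] = [None]*len(board[row]); pending[row][col] = disc
-- (out-of-range = IndexError, excluded by Pre_, where the port leaves pending unchanged)
def pvOvStep (board : List (List String)) (pending : List (Option (List (Option String)))) (u : (Int × Int) × String) : List (Option (List (Option String))) :=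
  match PySem.List.pyGet? pending u.1.1, PySem.List.pyGet? board u.1.1 with
  | some pOpt, some brow =>
    let p := pOpt.getD (List.replicate brow.length none)
    match PySem.List.pySet? p u.1.2 (some u.2) with
    | some p' => PySem.List.pySetD pending u.1.1 (some p')
    | none => pending
  | _, _ => pending

-- row if over is None else tuple(cell if d is None else d for d, cell in zip(over, row))
def pvMerge (pending : List (Option (List (Option String)))) (board : List (List String)) : List (List String) :=
  (pending.zip board).map (fun pr =>
    match pr.1 with
    | none => pr.2
    | some p => (p.zip pr.2).map (fun dc => dc.1.getD dc.2))

def board_with_discs_py_alt (board : List (List String)) (updates : List ((Int × Int) × String)) : List (List String) :=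
  pvMerge (updates.foldl (pvOvStep board) (List.replicate board.length none)) board

-- ===== PRECONDITION & SPEC =====
-- Pre_ = exactly the inputs where A raises no IndexError: every update's row index is
-- in range for the board and its col index is in range for that row.
def Pre_board_with_discs_py (board : List (List String)) (updates : List ((Int × Int) × String)) : Prop :=
  ∀ u ∈ updates,
    PySem.Raise.InRange board.length u.1.1 ∧
    PySem.Raise.InRange ((PySem.List.pyGet? board u.1.1).getD []).length u.1.2
instance (board : List (List String)) (updates : List ((Int × Int) × String)) : Decidable (Pre_board_with_discs_py board updates) := by unfold Pre_board_with_discs_py; infer_instance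

def pvWitness_board_with_discs_py : List (List String) × (List ((Int × Int) × String)) :=
  ([["."], ["X", "O"]], [((0, 0), "a"), ((-1, 1), "b")])

def Spec_board_with_discs_py (board : List (List String)) (updates : List ((Int × Int) × String)) (out : List (List String)) : Prop := out = board_with_discs_py_alt board updates
instance (board : List (List String)) (updates : List ((Int × Int) × String)) (out : List (List String)) : Decidable (Spec_board_with_discs_py board updates out) := by unfold Spec_board_with_discs_py; infer_instance

-- ===== CLAIM (what is proved, stated in full; the proofs are below) =====
def Claim_equal_board_with_discs_py : Prop := ∀ (board : List (List String)) (updates : List ((Int × Int) × String)), Dom_board_with_discs_py board updates → Pre_board_with_discs_py board updates → Spec_board_with_discs_py board updates (board_with_discs_py board updates)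

-- ===== LEMMAS AND PROOFS =====

-- well-formed overlay: same length as the board, and every materialized
-- overlay row has the length of its board row
def pvWF (pending : List (Option (List (Option String)))) (board : List (List String)) : Prop :=
  pending.length = board.length ∧
  ∀ (i : Nat) (p : List (Option String)), pending[i]? = some (some p) →
    p.length = (board[i]?.getD []).length

theorem pv_mod_wrap (i l : Int) (h1 : -l ≤ i) (h2 : i < l) :
    PySem.Int.mod i l = if 0 ≤ i then i else i + l := by
  have hl : 0 < l := by omega
  have hm : PySem.Int.mod i l = i % l := by
    simp [PySem.Int.mod, Int.fmod_eq_emod_of_nonneg _ (le_of_lt hl)]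
  rw [hm]
  split_ifs with h
  · exact Int.emod_eq_of_lt h h2
  · rw [← Int.add_emod_right]
    exact Int.emod_eq_of_lt (by omega) (by omega)

theorem pv_pyGet?_mod {α : Type} (xs : List α) (i : Int) (h1 : -(xs.length:Int) ≤ i) (h2 : i < xs.length) :
    PySem.List.pyGet? xs i = xs[(PySem.Int.mod i xs.length).toNat]? := by
  rw [pv_mod_wrap i xs.length h1 h2]
  simp only [PySem.List.pyGet?, PySem.List.pyIdx?]
  by_cases h : 0 ≤ i
  · rw [if_pos h, if_pos h, if_pos h2]; rfl
  · rw [if_neg h, if_neg (by omega : ¬ (0:Int) ≤ i), if_pos h1]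
    simp only [Option.bind_some]; congr 1; omega

theorem pv_pySet?_mod {α : Type} (xs : List α) (i : Int) (v : α) (h1 : -(xs.length:Int) ≤ i) (h2 : i < xs.length) :
    PySem.List.pySet? xs i v = some (xs.set (PySem.Int.mod i xs.length).toNat v) := by
  rw [pv_mod_wrap i xs.length h1 h2]
  simp only [PySem.List.pySet?, PySem.List.pyIdx?]
  by_cases h : 0 ≤ i
  · rw [if_pos h, if_pos h, if_pos h2]; rfl
  · rw [if_neg h, if_neg (by omega : ¬ (0:Int) ≤ i), if_pos h1]
    simp only [Option.map_some]; congr 2; omega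

theorem pv_mod_bounds (i l : Int) (h1 : -l ≤ i) (h2 : i < l) :
    0 ≤ PySem.Int.mod i l ∧ PySem.Int.mod i l < l := by
  rw [pv_mod_wrap i l h1 h2]; split_ifs <;> omega

-- merging a row with its overlay (board row on the right of the zip)
def pvMergeRow (pOpt : Option (List (Option String))) (row : List String) : List String :=
  match pOpt with
  | none => row
  | some p => (p.zip row).map (fun dc => dc.1.getD dc.2)

theorem pvMergeRow_length (pOpt : Option (List (Option String))) (row : List String)
    (h : ∀ p, pOpt = some p → p.length = row.length) :
    (pvMergeRow pOpt row).length = row.length := by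
  cases pOpt with
  | none => rfl
  | some p => simp [pvMergeRow, h p rfl]

theorem pvMergeRow_getElem (pOpt : Option (List (Option String))) (row : List String)
    (h : ∀ p, pOpt = some p → p.length = row.length)
    (j : Nat) (hj : j < row.length) :
    (pvMergeRow pOpt row)[j]'(by rw [pvMergeRow_length pOpt row h]; exact hj)
      = ((pOpt.getD (List.replicate row.length none))[j]'(by cases pOpt with
          | none => simpa using hj
          | some p => simpa [h p rfl] using hj)).getD (row[j]'hj) := by
  cases pOpt with
  | none => simp [pvMergeRow]
  | some p =>
    have hp := h p rfl
    simp [pvMergeRow, List.getElem_zip]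

theorem pvMerge_length (pending : List (Option (List (Option String)))) (board : List (List String))
    (h : pending.length = board.length) :
    (pvMerge pending board).length = board.length := by
  simp [pvMerge, h]

theorem pvMerge_getElem (pending : List (Option (List (Option String)))) (board : List (List String))
    (h : pending.length = board.length) (i : Nat) (hi : i < board.length) :
    (pvMerge pending board)[i]'(by rw [pvMerge_length pending board h]; exact hi)
      = pvMergeRow (pending[i]'(by omega)) (board[i]'hi) := by
  simp [pvMerge, pvMergeRow, List.getElem_zip]

theorem pvMerge_replicate (board : List (List String)) :
    pvMerge (List.replicate board.length none) board = board := by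
  apply List.ext_getElem
  · exact pvMerge_length _ _ (by simp)
  · intro i hi1 hi2
    rw [pvMerge_getElem _ _ (by simp) i hi2]
    simp [pvMergeRow]

-- one update: setting the cell in the merged board = merging the stepped overlay
theorem pv_step (board : List (List String)) (pending : List (Option (List (Option String))))
    (r c : Int) (v : String)
    (hwf : pvWF pending board)
    (hr : PySem.Raise.InRange board.length r)
    (hc : PySem.Raise.InRange ((PySem.List.pyGet? board r).getD []).length c) :
    pvSetCell (pvMerge pending board) r c v = pvMerge (pvOvStep board pending ((r, c), v)) board
    ∧ pvWF (pvOvStep board pending ((r, c), v)) board := by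
  obtain ⟨hlen, hrows⟩ := hwf
  unfold PySem.Raise.InRange at hr
  obtain ⟨hr1, hr2⟩ := hr
  have hrb := pv_mod_bounds r board.length hr1 hr2
  have hriR : (PySem.Int.mod r (board.length:Int)).toNat < board.length := by omega
  set ri := (PySem.Int.mod r (board.length:Int)).toNat with hri
  have hbrow : PySem.List.pyGet? board r = some (board[ri]'hriR) := by
    rw [pv_pyGet?_mod board r hr1 hr2]
    exact List.getElem?_eq_getElem hriR
  unfold PySem.Raise.InRange at hc
  rw [hbrow] at hc
  simp only [Option.getD_some] at hc
  obtain ⟨hc1, hc2⟩ := hc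
  have hcb := pv_mod_bounds c (board[ri]'hriR).length hc1 hc2
  have hciL : (PySem.Int.mod c ((board[ri]'hriR).length:Int)).toNat < (board[ri]'hriR).length := by omega
  set ci := (PySem.Int.mod c ((board[ri]'hriR).length:Int)).toNat with hci
  -- the materialized overlay row p and its length
  have hpOpt : PySem.List.pyGet? pending r = some (pending[ri]'(by omega)) := by
    rw [pv_pyGet?_mod pending r (by omega) (by omega)]
    have : (PySem.Int.mod r (pending.length:Int)).toNat = ri := by rw [hlen]
    rw [this]
    exact List.getElem?_eq_getElem (by omega)
  set p : List (Option String) :=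
    (pending[ri]'(by omega : ri < pending.length)).getD (List.replicate (board[ri]'hriR).length none) with hp
  have hplen : p.length = (board[ri]'hriR).length := by
    rw [hp]
    cases hpe : pending[ri]'(by omega : ri < pending.length) with
    | none => simp
    | some p0 =>
      have := hrows ri p0 (by rw [List.getElem?_eq_getElem (by omega : ri < pending.length), hpe])
      simpa [List.getElem?_eq_getElem hriR] using this
  -- B's step computes pending.set ri (some (p.set ci (some v)))
  have hbstep : pvOvStep board pending ((r, c), v)
      = pending.set ri (some (p.set ci (some v))) := by
    unfold pvOvStep
    rw [hpOpt, hbrow]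
    simp only
    have hset : PySem.List.pySet? p c (some v) = some (p.set ci (some v)) := by
      rw [pv_pySet?_mod p c (some v) (by omega) (by omega), hplen]
    rw [← hp, hset]
    simp only
    unfold PySem.List.pySetD
    rw [pv_pySet?_mod pending r _ (by omega) (by omega)]
    simp only [Option.getD_some]
    congr 1
    rw [hlen]
  have hwf' : pvWF (pending.set ri (some (p.set ci (some v)))) board := by
    constructor
    · simpa using hlen
    · intro i q hq
      by_cases hie : i = ri
      · subst hie
        rw [List.getElem?_set_self (by omega)] at hq
        simp only [Option.some.injEq] at hq
        rw [← hq]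
        simp [hplen, List.getElem?_eq_getElem hriR]
      · rw [List.getElem?_set_ne (by omega)] at hq
        exact hrows i q hq
  refine ⟨?_, hbstep ▸ hwf'⟩
  rw [hbstep]
  -- A's step on the merged board
  have hmlen := pvMerge_length pending board hlen
  have hmrow : (pvMerge pending board)[ri]'(by omega)
      = pvMergeRow (pending[ri]'(by omega)) (board[ri]'hriR) :=
    pvMerge_getElem pending board hlen ri hriR
  have hrowinv : ∀ q, pending[ri]'(by omega : ri < pending.length) = some q → q.length = (board[ri]'hriR).length := by
    intro q hq
    have := hrows ri q (by rw [List.getElem?_eq_getElem (by omega : ri < pending.length), hq])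
    simpa [List.getElem?_eq_getElem hriR] using this
  have hmrowlen : ((pvMerge pending board)[ri]'(by omega)).length = (board[ri]'hriR).length := by
    rw [hmrow]; exact pvMergeRow_length _ _ hrowinv
  have hGet : PySem.List.pyGet? (pvMerge pending board) r
      = some ((pvMerge pending board)[ri]'(by rw [hmlen]; exact hriR)) := by
    rw [pv_pyGet?_mod _ r (by rw [hmlen]; exact hr1) (by rw [hmlen]; exact hr2)]
    have h1 : (PySem.Int.mod r ((pvMerge pending board).length:Int)).toNat = ri := by rw [hmlen]
    rw [h1]
    exact List.getElem?_eq_getElem (by rw [hmlen]; exact hriR)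
  have hSet : PySem.List.pySet? ((pvMerge pending board)[ri]'(by rw [hmlen]; exact hriR)) c v
      = some (((pvMerge pending board)[ri]'(by rw [hmlen]; exact hriR)).set ci v) := by
    rw [pv_pySet?_mod _ c v (by rw [hmrowlen]; exact hc1) (by rw [hmrowlen]; exact hc2), hmrowlen]
  have hSetD : PySem.List.pySetD (pvMerge pending board) r (((pvMerge pending board)[ri]'(by rw [hmlen]; exact hriR)).set ci v)
      = (pvMerge pending board).set ri (((pvMerge pending board)[ri]'(by rw [hmlen]; exact hriR)).set ci v) := by
    unfold PySem.List.pySetD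
    rw [pv_pySet?_mod _ r _ (by rw [hmlen]; exact hr1) (by rw [hmlen]; exact hr2)]
    simp only [Option.getD_some]
    congr 2
    rw [hmlen]
  unfold pvSetCell
  rw [hGet]
  simp only
  rw [hSet]
  simp only
  rw [hSetD]
  -- elementwise comparison
  have hlen' : (pending.set ri (some (p.set ci (some v)))).length = board.length := by
    simpa using hlen
  apply List.ext_getElem
  · rw [List.length_set, hmlen, pvMerge_length _ _ hlen']
  · intro i hi1 hi2
    have hib : i < board.length := by
      have := pvMerge_length (pending.set ri (some (p.set ci (some v)))) board hlen'
      omega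
    rw [pvMerge_getElem (pending.set ri (some (p.set ci (some v)))) board hlen' i hib]
    rw [List.getElem_set]
    by_cases hie : ri = i
    · rw [if_pos hie]
      subst hie
      rw [List.getElem_set_self (by simp only [List.length_set]; omega : ri < (pending.set ri (some (p.set ci (some v)))).length)]
      rw [hmrow]
      have hinv' : ∀ q, (some (p.set ci (some v)) : Option (List (Option String))) = some q → q.length = (board[ri]'hriR).length := by
        intro q hq; simp only [Option.some.injEq] at hq; rw [← hq]; simp [hplen]
      apply List.ext_getElem
      · rw [List.length_set, pvMergeRow_length _ _ hrowinv, pvMergeRow_length _ _ hinv']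
      · intro j hj1 hj2
        have hjL : j < (board[ri]'hriR).length := by
          rw [List.length_set, pvMergeRow_length _ _ hrowinv] at hj1
          exact hj1
        have hRHS := pvMergeRow_getElem (some (p.set ci (some v))) (board[ri]'hriR) hinv' j hjL
        simp only [Option.getD_some] at hRHS
        have hLHS := pvMergeRow_getElem (pending[ri]'(by omega : ri < pending.length)) (board[ri]'hriR) hrowinv j hjL
        rw [List.getElem_set]
        rw [hRHS]
        rw [List.getElem_set]
        by_cases hje : ci = j
        · rw [if_pos hje, if_pos hje]
          simp
        · rw [if_neg hje, if_neg hje]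
          rw [hLHS]
    · rw [if_neg hie]
      rw [List.getElem_set_ne (by omega : ri ≠ i)]
      exact pvMerge_getElem pending board hlen i hib

theorem pv_main (board : List (List String)) (updates : List ((Int × Int) × String))
    (pending : List (Option (List (Option String))))
    (hwf : pvWF pending board)
    (hpre : Pre_board_with_discs_py board updates) :
    updates.foldl (fun rows u => pvSetCell rows u.1.1 u.1.2 u.2) (pvMerge pending board)
      = pvMerge (updates.foldl (pvOvStep board) pending) board := by
  induction updates generalizing pending with
  | nil => simp
  | cons u us ih =>
    have hu := hpre u List.mem_cons_self
    have hstep := pv_step board pending u.1.1 u.1.2 u.2 hwf hu.1 hu.2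
    simp only [List.foldl_cons]
    have : pvSetCell (pvMerge pending board) u.1.1 u.1.2 u.2
        = pvMerge (pvOvStep board pending ((u.1.1, u.1.2), u.2)) board := hstep.1
    rw [this]
    exact ih _ hstep.2 (fun x hx => hpre x (List.mem_cons_of_mem u hx))

-- ===== VERDICT (by name: the statement is the Claim_ definition above) =====
theorem board_with_discs_py_spec : Claim_equal_board_with_discs_py := by
  intro board updates _ hpre
  unfold Spec_board_with_discs_py board_with_discs_py board_with_discs_py_alt
  have h0 : pvWF (List.replicate board.length none) board := by
    constructor
    · simp
    · intro i p hp
      rcases List.getElem?_eq_some_iff.mp hp with ⟨h1, h2⟩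
      simp at h2
  rw [← pvMerge_replicate board]
  rw [pv_main board updates _ h0 hpre]
  rw [pvMerge_replicate board]
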